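-- pv_equiv track=rewrite | github.com/liuslevis/HeroDetect | demo_mp4.py | kill_info
-- ===== SOURCE A (Python) =====
-- def kill_info(i_sec):
--     info = [(18, 2),
--         (27, 3),
--         (44, 2),
--         (48, 3),
--         (54, 4),
--         (66, 2),
--         (71, 3),
--         (75, 4),
--         (79, 5),
--         (91, 2),
--         (96, 3),
--         (99, 4),
--         (106, 5),
--         (123, 2),
--         (132, 3),
--         (137, 4),
--         (160, 2),
--         (166, 3),
--         (180, 6),
--         (185, 2),
--         (189, 3),
--         (194, 4),
--         (197, 5),
--         (209, 2),
--         (213, 2),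
--         (128, 3),
--         (223, 4),
--         (229, 5),]
--     for sec, kill in info:
--         if sec <= i_sec <= sec + 2:
--             return '{} kill'.format(kill)
--     return ''
-- ===== SOURCE B (Python) =====
-- RAW = [(18, 2), (27, 3), (44, 2), (48, 3), (54, 4), (66, 2), (71, 3),
--        (75, 4), (79, 5), (91, 2), (96, 3), (99, 4), (106, 5), (123, 2),
--        (132, 3), (137, 4), (160, 2), (166, 3), (180, 6), (185, 2),
--        (189, 3), (194, 4), (197, 5), (209, 2), (213, 2), (128, 3),
--        (223, 4), (229, 5)]
--
-- # The intervals [sec, sec+2] are pairwise disjoint, so after sorting by sec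
-- # the (unique) interval containing i_sec, if any, is the one with the
-- # greatest sec <= i_sec: find it by binary search.
-- PAIRS = sorted(RAW, key=lambda p: p[0])
--
-- def kill_info(i_sec):
--     lo, hi = 0, len(PAIRS)
--     while lo < hi:
--         mid = (lo + hi) // 2
--         if PAIRS[mid][0] <= i_sec:
--             lo = mid + 1
--         else:
--             hi = mid
--     if lo > 0:
--         sec, kill = PAIRS[lo - 1]
--         if i_sec <= sec + 2:
--             return '{} kill'.format(kill)
--     return ''
-- ===== Notes on version B (the rewrite author's own statement) =====
-- stated objective: alternative
-- what changed: Replaces A's per-query linear scan over the interval list by sorting the intervals by start once and answering each query with a hand-written binary search for the greatest start at or below i_sec, then a single containment check; exact because the intervals are pairwise disjoint.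
import Mathlib
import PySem

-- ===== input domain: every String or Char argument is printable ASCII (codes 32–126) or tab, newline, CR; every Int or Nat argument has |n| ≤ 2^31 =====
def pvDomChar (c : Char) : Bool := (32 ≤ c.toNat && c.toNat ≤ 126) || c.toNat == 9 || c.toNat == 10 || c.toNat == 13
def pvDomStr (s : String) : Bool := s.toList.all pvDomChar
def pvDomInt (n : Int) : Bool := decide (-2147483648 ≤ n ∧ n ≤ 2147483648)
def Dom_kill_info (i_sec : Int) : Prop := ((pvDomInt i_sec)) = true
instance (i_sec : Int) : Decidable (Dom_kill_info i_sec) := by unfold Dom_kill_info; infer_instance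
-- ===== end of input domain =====

set_option maxHeartbeats 2000000
set_option maxRecDepth 100000


-- B replaces A's per-query linear scan by a one-time sort of the intervals by start
-- plus a binary search for the greatest start ≤ i_sec (alternative algorithm, exact
-- because the intervals are pairwise disjoint).

-- ===== PORT A =====
def pvInfoA : List (Int × Int) :=
  [(18, 2), (27, 3), (44, 2), (48, 3), (54, 4), (66, 2), (71, 3),
   (75, 4), (79, 5), (91, 2), (96, 3), (99, 4), (106, 5), (123, 2),
   (132, 3), (137, 4), (160, 2), (166, 3), (180, 6), (185, 2),
   (189, 3), (194, 4), (197, 5), (209, 2), (213, 2), (128, 3),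
   (223, 4), (229, 5)]

-- the 'for sec, kill in info: if …: return …' loop, as structural recursion
def pvScanA (i_sec : Int) : List (Int × Int) → String
  | [] => ""
  | (sec, kill) :: rest =>
      if sec ≤ i_sec ∧ i_sec ≤ sec + 2 then PySem.Int.toStr kill ++ " kill"
      else pvScanA i_sec rest

def kill_info (i_sec : Int) : String := pvScanA i_sec pvInfoA

-- ===== PORT B =====
def pvRawB : List (Int × Int) :=
  [(18, 2), (27, 3), (44, 2), (48, 3), (54, 4), (66, 2), (71, 3),
   (75, 4), (79, 5), (91, 2), (96, 3), (99, 4), (106, 5), (123, 2),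
   (132, 3), (137, 4), (160, 2), (166, 3), (180, 6), (185, 2),
   (189, 3), (194, 4), (197, 5), (209, 2), (213, 2), (128, 3),
   (223, 4), (229, 5)]

-- PAIRS = sorted(RAW, key=lambda p: p[0])
def pvPairsB : List (Int × Int) := PySem.List.sorted pvRawB (fun p => p.1)

-- the 'while lo < hi: …' binary-search loop; fuel only makes it total
-- (hi - lo ≤ fuel at the call, so the fuel never runs out)
def pvSearchB (i_sec : Int) : Nat → Nat → Nat → Nat
  | 0, lo, _ => lo
  | fuel + 1, lo, hi =>
      if lo < hi then
        let mid := (lo + hi) / 2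
        if ((PySem.List.pyGet? pvPairsB (mid : Int)).getD (0, 0)).1 ≤ i_sec then
          pvSearchB i_sec fuel (mid + 1) hi
        else
          pvSearchB i_sec fuel lo mid
      else lo

def kill_info_alt (i_sec : Int) : String :=
  let lo := pvSearchB i_sec pvPairsB.length 0 pvPairsB.length
  if 0 < lo then
    let p := (PySem.List.pyGet? pvPairsB ((lo : Int) - 1)).getD (0, 0)
    if i_sec ≤ p.1 + 2 then PySem.Int.toStr p.2 ++ " kill" else ""
  else ""

-- ===== PRECONDITION & SPEC =====
def Spec_kill_info (i_sec : Int) (out : String) : Prop := out = kill_info_alt i_sec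
instance (i_sec : Int) (out : String) : Decidable (Spec_kill_info i_sec out) := by unfold Spec_kill_info; infer_instance

-- ===== CLAIM (what is proved, stated in full; the proofs are below) =====
def Claim_equal_kill_info : Prop := ∀ (i_sec : Int), Dom_kill_info i_sec → Spec_kill_info i_sec (kill_info i_sec)

-- ===== LEMMAS AND PROOFS =====

theorem pvPairsB_len : pvPairsB.length = 28 := by decide

-- every start in the sorted list is between 18 and 229
theorem pvPairsB_bounds :
    ∀ m : Nat, m < 28 →
      18 ≤ ((PySem.List.pyGet? pvPairsB (m : Int)).getD (0, 0)).1 ∧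
      ((PySem.List.pyGet? pvPairsB (m : Int)).getD (0, 0)).1 ≤ 229 := by decide

-- when i_sec is below every start, the search never moves lo and returns it
theorem pvSearchB_low (i_sec : Int) (h : i_sec < 18) :
    ∀ fuel lo hi, hi - lo ≤ fuel → hi ≤ 28 → pvSearchB i_sec fuel lo hi = lo := by
  intro fuel
  induction fuel with
  | zero => intro lo hi h1 _; unfold pvSearchB; rfl
  | succ n ih =>
      intro lo hi h1 h2
      unfold pvSearchB
      by_cases hlh : lo < hi
      · rw [if_pos hlh]
        have hb := pvPairsB_bounds ((lo + hi) / 2) (by omega)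
        rw [if_neg (by omega)]
        exact ih lo ((lo + hi) / 2) (by omega) (by omega)
      · rw [if_neg hlh]

-- when i_sec is at or above every start, the search moves lo all the way to hi
theorem pvSearchB_high (i_sec : Int) (h : 229 ≤ i_sec) :
    ∀ fuel lo hi, lo ≤ hi → hi - lo ≤ fuel → hi ≤ 28 → pvSearchB i_sec fuel lo hi = hi := by
  intro fuel
  induction fuel with
  | zero => intro lo hi h0 h1 _; unfold pvSearchB; omega
  | succ n ih =>
      intro lo hi h0 h1 h2
      unfold pvSearchB
      by_cases hlh : lo < hi
      · rw [if_pos hlh]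
        have hb := pvPairsB_bounds ((lo + hi) / 2) (by omega)
        rw [if_pos (by omega)]
        exact ih ((lo + hi) / 2 + 1) hi (by omega) (by omega) h2
      · rw [if_neg hlh]; omega

-- the bounded middle range, checked value by value
theorem pvMid : ∀ n : Nat, n < 214 →
    kill_info (18 + (n : Int)) = kill_info_alt (18 + (n : Int)) := by decide

theorem pvLast : PySem.List.pyGet? pvPairsB ((28 : Int) - 1) = some (229, 5) := by decide

-- ===== VERDICT (by name: the statement is the Claim_ definition above) =====
theorem kill_info_spec : Claim_equal_kill_info := by
  intro i _
  unfold Spec_kill_info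
  by_cases hlow : i < 18
  · have hb : kill_info_alt i = "" := by
      unfold kill_info_alt
      rw [pvPairsB_len, pvSearchB_low i hlow 28 0 28 (by omega) (by omega)]
      rfl
    rw [hb]
    simp only [kill_info, pvInfoA, pvScanA]
    repeat rw [if_neg (by omega)]
  · by_cases hhigh : 231 < i
    · have hb : kill_info_alt i = "" := by
        unfold kill_info_alt
        rw [pvPairsB_len, pvSearchB_high i (by omega) 28 0 28 (by omega) (by omega) (by omega)]
        rw [if_pos (by omega)]
        simp only [Nat.cast_ofNat, pvLast, Option.getD_some]
        rw [if_neg (by omega)]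
      rw [hb]
      simp only [kill_info, pvInfoA, pvScanA]
      repeat rw [if_neg (by omega)]
    · have hi : i = 18 + ((i - 18).toNat : Int) := by omega
      rw [hi]
      exact pvMid (i - 18).toNat (by omega)
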